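-- pv_equiv track=rewrite | github.com/SisyphusRex/AdventOfCode2024Day7 | program.py | evaluate_list_of_values
-- ===== SOURCE A (Python) =====
-- def evaluate_list_of_values(list_of_values) -> list:
--     length_of_list = len(list_of_values)
--     possible_outcomes = []
--     if length_of_list == 2:
--         plus = list_of_values[0] + list_of_values[1]
--         multiply = list_of_values[0] * list_of_values[1]
--         possible_outcomes.append(plus)
--         possible_outcomes.append(multiply)
--
--         return possible_outcomes
--     new_list_of_values = list_of_values[0 : length_of_list - 1]
--     final_element = list_of_values[length_of_list - 1]
--     previous_outcomes = evaluate_list_of_values(new_list_of_values)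
--     for element in previous_outcomes:
--         plus = element + final_element
--         multiply = element * final_element
--         possible_outcomes.append(plus)
--         possible_outcomes.append(multiply)
--     return possible_outcomes
-- ===== SOURCE B (Python) =====
-- def evaluate_list_of_values(list_of_values) -> list:
--     outcomes = [list_of_values[0] + list_of_values[1],
--                 list_of_values[0] * list_of_values[1]]
--     for x in list_of_values[2:]:
--         outcomes = [r for o in outcomes for r in (o + x, o * x)]
--     return outcomes
-- ===== Notes on version B (the rewrite author's own statement) =====
-- stated objective: simpler
-- what changed: Replaced the recursion-on-the-last-element with an iterative left-to-right fold: seed the outcome list from the first two values, then for each remaining element rebuild the outcome list with a comprehension.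
import Mathlib
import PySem

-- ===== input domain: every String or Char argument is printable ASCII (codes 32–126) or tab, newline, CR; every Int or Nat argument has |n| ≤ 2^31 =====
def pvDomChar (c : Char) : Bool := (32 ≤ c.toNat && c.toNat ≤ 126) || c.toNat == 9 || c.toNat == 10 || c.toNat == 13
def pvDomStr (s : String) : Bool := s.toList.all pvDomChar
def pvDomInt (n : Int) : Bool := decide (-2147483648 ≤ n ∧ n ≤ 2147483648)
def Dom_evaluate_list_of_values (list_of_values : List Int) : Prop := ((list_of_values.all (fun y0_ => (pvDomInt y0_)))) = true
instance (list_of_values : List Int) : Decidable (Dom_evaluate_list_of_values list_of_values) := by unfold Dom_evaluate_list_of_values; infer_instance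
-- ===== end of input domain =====

-- B replaces A's recursion on the last element with an iterative left-to-right fold (simpler decomposition, same cost).

-- ===== PORT A =====
-- A recurses: for length 2 it returns [a+b, a*b]; otherwise it recurses on the
-- list without its last element and appends plus/multiply for each previous outcome.
-- On lists of length < 2 the Python raises IndexError (excluded by Pre_); the port
-- returns [] there (getLast? = none models the failing negative index lookup).
def evaluate_list_of_values (list_of_values : List Int) : List Int :=
  if h2 : list_of_values.length = 2 then
    [list_of_values.headI + list_of_values.getLastD 0,
     list_of_values.headI * list_of_values.getLastD 0]
  else
    match hfin : list_of_values.getLast? with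
    | none => []   -- Python: IndexError on list_of_values[-1] (empty list); outside Pre_
    | some final_element =>
      let new_list_of_values := list_of_values.dropLast
      let previous_outcomes := evaluate_list_of_values new_list_of_values
      previous_outcomes.foldl
        (fun acc element => acc ++ [element + final_element, element * final_element]) []
termination_by list_of_values.length
decreasing_by
  have hne : list_of_values ≠ [] := by
    intro h; rw [h] at hfin; simp at hfin
  have hpos : 0 < list_of_values.length := List.length_pos_iff.mpr hne
  simp [List.length_dropLast]
  omega

-- ===== PORT B =====
def evaluate_list_of_values_alt (list_of_values : List Int) : List Int :=
  match list_of_values with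
  | a :: b :: rest =>
    rest.foldl (fun outcomes x => outcomes.flatMap (fun o => [o + x, o * x]))
      [a + b, a * b]
  | _ => []   -- Python: IndexError on lists of length < 2; outside Pre_

-- ===== PRECONDITION & SPEC =====
-- Pre_ excludes exactly the lists of length < 2, on which the Python A raises IndexError.
def Pre_evaluate_list_of_values (list_of_values : List Int) : Prop :=
  2 ≤ list_of_values.length
instance (list_of_values : List Int) : Decidable (Pre_evaluate_list_of_values list_of_values) := by unfold Pre_evaluate_list_of_values; infer_instance
def pvWitness_evaluate_list_of_values : List Int := [2, 3, 4]

def Spec_evaluate_list_of_values (list_of_values : List Int) (out : List Int) : Prop := out = evaluate_list_of_values_alt list_of_values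
instance (list_of_values : List Int) (out : List Int) : Decidable (Spec_evaluate_list_of_values list_of_values out) := by unfold Spec_evaluate_list_of_values; infer_instance

-- ===== CLAIM (what is proved, stated in full; the proofs are below) =====
def Claim_equal_evaluate_list_of_values : Prop := ∀ (list_of_values : List Int), Dom_evaluate_list_of_values list_of_values → Pre_evaluate_list_of_values list_of_values → Spec_evaluate_list_of_values list_of_values (evaluate_list_of_values list_of_values)

-- ===== LEMMAS AND PROOFS =====

-- B on a list extended by one element = flatMap of B on the shorter list.
theorem alt_snoc (a b x : Int) (rest : List Int) :
    evaluate_list_of_values_alt (a :: b :: (rest ++ [x]))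
      = (evaluate_list_of_values_alt (a :: b :: rest)).flatMap (fun o => [o + x, o * x]) := by
  simp [evaluate_list_of_values_alt, List.foldl_append]

-- A = B on every list of length ≥ 2, by induction on the tail from the right.
theorem eq_on_pre (a b : Int) (rest : List Int) :
    evaluate_list_of_values (a :: b :: rest) = evaluate_list_of_values_alt (a :: b :: rest) := by
  induction rest using List.reverseRecOn with
  | nil =>
    unfold evaluate_list_of_values
    simp [evaluate_list_of_values_alt]
  | append_singleton rest x ih =>
    rw [alt_snoc, ← ih]
    conv_lhs => rw [evaluate_list_of_values.eq_def]
    have hlen : (a :: b :: (rest ++ [x])).length ≠ 2 := by simp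
    rw [dif_neg hlen]
    have hlast : (a :: b :: (rest ++ [x])).getLast? = some x := by
      rw [show a :: b :: (rest ++ [x]) = (a :: b :: rest) ++ [x] by simp]
      exact List.getLast?_concat
    split
    · rename_i h; rw [hlast] at h; cases h
    · rename_i f h
      rw [hlast] at h; cases h
      have hdrop : (a :: b :: (rest ++ [x])).dropLast = a :: b :: rest := by
        rw [show a :: b :: (rest ++ [x]) = (a :: b :: rest) ++ [x] by simp]
        exact List.dropLast_concat
      rw [hdrop, PySem.List.foldl_append_eq_flatMap]
      simp only [List.nil_append]

-- ===== VERDICT (by name: the statement is the Claim_ definition above) =====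
theorem evaluate_list_of_values_spec : Claim_equal_evaluate_list_of_values := by
  intro l _ hpre
  match l, hpre with
  | a :: b :: rest, _ =>
    exact eq_on_pre a b rest
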